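-- pv_equiv track=rewrite | github.com/PoojaDeswal94/Pacman-with-Pygame | Pygame/Maze1_main.py | loadMaze1
-- ===== SOURCE A (Python) =====
-- def loadMaze1(input_file):
--     maze3=[]
--     l=len(input_file)
--     ln=len(input_file[0])
--     for i in range(0,l):
--         for j in range(0,ln):
--             if input_file[i][j]== "1" :
--                 maze3.append(input_file[i][j])
--             elif input_file[i][j]== "0" :
--                 maze3.append(input_file[i][j])
--             elif input_file[i][j]== "s" :
--                 maze3.append(input_file[i][j])
--             elif input_file[i][j]== "e" :
--                 maze3.append(input_file[i][j])
--             else: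
--                 continue
--     def to_matrix(list1, n):
--         return [list1[i:i+n] for i in range(0,len(list1),n)]
--
--     maze1=to_matrix(maze3,10)
--     return maze1
-- ===== SOURCE B (Python) =====
-- def loadMaze1(input_file):
--     # Single pass: build each 10-wide row incrementally instead of flattening then slicing.
--     l = len(input_file)
--     ln = len(input_file[0])
--     keep = {"1", "0", "s", "e"}
--     rows = []
--     cur = []
--     for i in range(l):
--         for j in range(ln):
--             c = input_file[i][j]
--             if c in keep:
--                 cur.append(c)
--                 if len(cur) == 10:
--                     rows.append(cur)
--                     cur = []
--     if cur:
--         rows.append(cur)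
--     return rows
-- ===== Notes on version B (the rewrite author's own statement) =====
-- stated objective: simpler
-- what changed: B builds the 10-wide rows incrementally in the single filtering pass (closing the current row when it reaches length 10 and flushing the partial row at the end) instead of A's flatten-into-one-list then slice-comprehension reshape.
import Mathlib
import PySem

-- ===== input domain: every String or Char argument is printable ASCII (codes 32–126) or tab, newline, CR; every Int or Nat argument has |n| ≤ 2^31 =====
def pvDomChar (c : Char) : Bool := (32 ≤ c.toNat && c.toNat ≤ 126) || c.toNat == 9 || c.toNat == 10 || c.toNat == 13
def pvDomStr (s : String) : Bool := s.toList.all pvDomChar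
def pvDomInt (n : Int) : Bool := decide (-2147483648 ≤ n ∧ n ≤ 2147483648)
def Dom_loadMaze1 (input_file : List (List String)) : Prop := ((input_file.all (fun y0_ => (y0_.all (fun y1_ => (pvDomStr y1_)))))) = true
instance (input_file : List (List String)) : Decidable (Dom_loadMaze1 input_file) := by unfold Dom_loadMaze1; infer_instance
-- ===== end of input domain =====

-- B replaces A's flatten-then-slice reshape by a single pass that grows the current
-- 10-wide row in place (objective: simpler decomposition, no intermediate flat list).

-- ===== PORT A =====
-- to_matrix(list1, n) = [list1[i:i+n] for i in range(0, len(list1), n)]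
def loadMaze1_toMatrix (list1 : List String) (n : Int) : List (List String) :=
  (PySem.List.pyRange 0 (list1.length : Int) n).map
    (fun i => PySem.List.slice list1 (some i) (some (i + n)))

-- input_file[i][j] is ported with pyGetD; Pre_loadMaze1 keeps every index in range,
-- so the default is never taken on admitted inputs (Python raises IndexError outside Pre_).
def loadMaze1 (input_file : List (List String)) : List (List String) :=
  let l : Int := (input_file.length : Int)
  let ln : Int := ((input_file.headD []).length : Int)
  let maze3 := (PySem.List.pyRange 0 l 1).foldl
    (fun acc i =>
      (PySem.List.pyRange 0 ln 1).foldl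
        (fun acc j =>
          let c := PySem.List.pyGetD (PySem.List.pyGetD input_file i []) j ""
          if c == "1" then acc ++ [c]
          else if c == "0" then acc ++ [c]
          else if c == "s" then acc ++ [c]
          else if c == "e" then acc ++ [c]
          else acc)
        acc)
    ([] : List String)
  loadMaze1_toMatrix maze3 10

-- ===== PORT B =====
-- one step of B's loop body: keep the char, close the current row at width 10
def loadMaze1_push (st : List (List String) × List String) (c : String) :
    List (List String) × List String :=
  if ["1", "0", "s", "e"].contains c then
    let cur := st.2 ++ [c]
    if cur.length == 10 then (st.1 ++ [cur], []) else (st.1, cur)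
  else st

def loadMaze1_alt (input_file : List (List String)) : List (List String) :=
  let l : Int := (input_file.length : Int)
  let ln : Int := ((input_file.headD []).length : Int)
  let st := (PySem.List.pyRange 0 l 1).foldl
    (fun st i =>
      (PySem.List.pyRange 0 ln 1).foldl
        (fun st j =>
          loadMaze1_push st (PySem.List.pyGetD (PySem.List.pyGetD input_file i []) j ""))
        st)
    (([], []) : List (List String) × List String)
  if st.2.isEmpty then st.1 else st.1 ++ [st.2]

-- ===== PRECONDITION & SPEC =====
-- Pre_ excludes exactly the inputs where Python A raises IndexError: the empty list
-- (len(input_file[0])) and files with a row shorter than row 0 (input_file[i][j]).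
def Pre_loadMaze1 (input_file : List (List String)) : Prop :=
  input_file ≠ [] ∧ ∀ row ∈ input_file, (input_file.headD []).length ≤ row.length
instance (input_file : List (List String)) : Decidable (Pre_loadMaze1 input_file) := by
  unfold Pre_loadMaze1; infer_instance

def pvWitness_loadMaze1 : List (List String) :=
  [["1", "0", "x"], ["s", "e", "9"], ["e", "e", "e", "0"]]

def Spec_loadMaze1 (input_file : List (List String)) (out : List (List String)) : Prop := out = loadMaze1_alt input_file
instance (input_file : List (List String)) (out : List (List String)) : Decidable (Spec_loadMaze1 input_file out) := by unfold Spec_loadMaze1; infer_instance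

-- ===== CLAIM (what is proved, stated in full; the proofs are below) =====
def Claim_equal_loadMaze1 : Prop := ∀ (input_file : List (List String)), Dom_loadMaze1 input_file → Pre_loadMaze1 input_file → Spec_loadMaze1 input_file (loadMaze1 input_file)

-- ===== LEMMAS AND PROOFS =====

-- the membership test both programs perform, as one Bool predicate
def loadMaze1_keep (c : String) : Bool := c == "1" || c == "0" || c == "s" || c == "e"

-- B's push step on a char that IS kept
def loadMaze1_pushK (st : List (List String) × List String) (c : String) :
    List (List String) × List String :=
  let cur := st.2 ++ [c]
  if cur.length == 10 then (st.1 ++ [cur], []) else (st.1, cur)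

-- chunking into rows of 10, the common midpoint of the two reshapes
def loadMaze1_chunks (xs : List String) : List (List String) :=
  if h : xs = [] then [] else xs.take 10 :: loadMaze1_chunks (xs.drop 10)
termination_by xs.length
decreasing_by
  simp only [List.length_drop]
  have : 0 < xs.length := List.length_pos_iff.mpr h
  omega

theorem loadMaze1_stepA_eq :
    (fun (acc : List String) (c : String) =>
      if c == "1" then acc ++ [c]
      else if c == "0" then acc ++ [c]
      else if c == "s" then acc ++ [c]
      else if c == "e" then acc ++ [c]
      else acc)
    = fun acc c => if loadMaze1_keep c then acc ++ [c] else acc := by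
  funext acc c
  by_cases h1 : c = "1" <;> by_cases h2 : c = "0" <;> by_cases h3 : c = "s" <;>
    by_cases h4 : c = "e" <;> simp [loadMaze1_keep, h1, h2, h3, h4]

theorem loadMaze1_push_eq :
    loadMaze1_push = fun st c => if loadMaze1_keep c then loadMaze1_pushK st c else st := by
  funext st c
  by_cases h1 : c = "1" <;> by_cases h2 : c = "0" <;> by_cases h3 : c = "s" <;>
    by_cases h4 : c = "e" <;>
    simp [loadMaze1_push, loadMaze1_pushK, loadMaze1_keep, h1, h2, h3, h4]

theorem loadMaze1_foldl_flatMap {α β γ : Type} (g : β → List α) (f : γ → α → γ) :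
    ∀ (rows : List β) (init : γ),
      rows.foldl (fun acc row => (g row).foldl f acc) init = (rows.flatMap g).foldl f init
  | [], _ => rfl
  | r :: rs, init => by
      simp only [List.foldl_cons, List.flatMap_cons, List.foldl_append]
      exact loadMaze1_foldl_flatMap g f rs _

-- under Pre_, the double index loop is a fold over the rows truncated to row 0's width
theorem loadMaze1_nested_fold {γ : Type} (input_file : List (List String)) (f : γ → String → γ)
    (init : γ)
    (hpre : ∀ row ∈ input_file, (input_file.headD []).length ≤ row.length) :
    (PySem.List.pyRange 0 (input_file.length : Int) 1).foldl
      (fun acc i =>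
        (PySem.List.pyRange 0 ((input_file.headD []).length : Int) 1).foldl
          (fun acc j => f acc (PySem.List.pyGetD (PySem.List.pyGetD input_file i []) j ""))
          acc)
      init
    = (input_file.flatMap (fun row => row.take (input_file.headD []).length)).foldl f init := by
  set ln := (input_file.headD []).length with hln
  rw [PySem.List.foldl_pyRange_zero_pyGetD' input_file []
      (fun acc row =>
        (PySem.List.pyRange 0 (ln : Int) 1).foldl
          (fun acc j => f acc (PySem.List.pyGetD row j "")) acc) init]
  rw [← loadMaze1_foldl_flatMap (fun row => row.take ln) f input_file init]
  apply PySem.List.foldl_congr_mem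
  intro acc row hrow
  have hle : ln ≤ row.length := hpre row hrow
  have hlen : (row.take ln).length = ln := by
    simp [List.length_take]; omega
  have hcongr : ∀ (a : γ), ∀ j ∈ PySem.List.pyRange 0 (ln : Int) 1,
      f a (PySem.List.pyGetD row j "") = f a (PySem.List.pyGetD (row.take ln) j "") := by
    intro a j hj
    obtain ⟨h0, h1⟩ := PySem.List.mem_pyRange_one.mp hj
    have h1' : j < (row.length : Int) := by exact_mod_cast lt_of_lt_of_le h1 (by exact_mod_cast hle)
    have h1'' : j < ((row.take ln).length : Int) := by rw [hlen]; exact h1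
    rw [PySem.List.pyGetD_eq_getElem row "" h0 h1',
        PySem.List.pyGetD_eq_getElem (row.take ln) "" h0 h1'']
    congr 1
    rw [List.getElem_take]
  rw [PySem.List.foldl_congr_mem _ _ _ acc hcongr]
  have hb : (ln : Int) = ((row.take ln).length : Int) := by rw [hlen]
  rw [hb, PySem.List.foldl_pyRange_zero_pyGetD' (row.take ln) "" f acc]

theorem loadMaze1_chunks_eq_map :
    ∀ (n : Nat) (xs : List String), xs.length ≤ n →
      loadMaze1_chunks xs
      = (List.range ((xs.length + 9) / 10)).map (fun k => (xs.drop (10 * k)).take 10) := by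
  intro n
  induction n with
  | zero =>
      intro xs h
      have : xs = [] := List.length_eq_zero_iff.mp (Nat.le_zero.mp h)
      subst this
      rw [loadMaze1_chunks]
      simp
  | succ n ih =>
      intro xs h
      by_cases hx : xs = []
      · subst hx; rw [loadMaze1_chunks]; simp
      · have hL : 0 < xs.length := List.length_pos_iff.mpr hx
        rw [loadMaze1_chunks]
        simp only [hx, dite_false]
        have hm : (xs.length + 9) / 10 = ((xs.drop 10).length + 9) / 10 + 1 := by
          simp only [List.length_drop]; omega
        rw [hm, List.range_succ_eq_map, List.map_cons, List.map_map,
            ih (xs.drop 10) (by simp only [List.length_drop]; omega)]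
        refine congrArg₂ List.cons (by simp) ?_
        apply List.map_congr_left
        intro k _
        simp only [Function.comp_apply, List.drop_drop]
        congr 2
        omega

theorem loadMaze1_toMatrix_eq_map (xs : List String) :
    loadMaze1_toMatrix xs 10
    = (List.range ((xs.length + 9) / 10)).map (fun k => (xs.drop (10 * k)).take 10) := by
  unfold loadMaze1_toMatrix
  rw [PySem.List.pyRange_of_pos 0 (xs.length : Int) (by norm_num)]
  have hM : (if (0 : Int) < (xs.length : Int)
      then (((xs.length : Int) - 0 + 10 - 1) / 10).toNat else 0) = (xs.length + 9) / 10 := by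
    split_ifs with h <;> omega
  rw [hM, List.map_map]
  apply List.map_congr_left
  intro k _
  simp only [Function.comp_apply]
  have h1 : (0 : Int) + 10 * (k : Int) = ((10 * k : Nat) : Int) := by push_cast; ring
  rw [h1]
  exact_mod_cast PySem.List.slice_natCast_add xs (10 * k) 10

-- invariant of B's accumulation: finishing the fold and flushing the partial row
-- is chunking what remains to be consumed
theorem loadMaze1_fold_inv :
    ∀ (xs : List String) (rows : List (List String)) (cur : List String), cur.length < 10 →
      (if (xs.foldl loadMaze1_pushK (rows, cur)).2.isEmpty
        then (xs.foldl loadMaze1_pushK (rows, cur)).1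
        else (xs.foldl loadMaze1_pushK (rows, cur)).1 ++ [(xs.foldl loadMaze1_pushK (rows, cur)).2])
      = rows ++ loadMaze1_chunks (cur ++ xs)
  | [], rows, cur, hcur => by
      simp only [List.foldl_nil, List.append_nil]
      by_cases hc : cur = []
      · subst hc; rw [loadMaze1_chunks]; simp
      · have h1 : cur.take 10 = cur := List.take_of_length_le (by omega)
        have h2 : cur.drop 10 = [] := List.drop_eq_nil_of_le (by omega : cur.length ≤ 10)
        rw [loadMaze1_chunks]
        simp only [hc, dite_false, h1, h2]
        rw [loadMaze1_chunks]
        simp [hc]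
  | c :: xs, rows, cur, hcur => by
      simp only [List.foldl_cons]
      by_cases h10 : cur.length + 1 = 10
      · have h9 : cur.length = 9 := by omega
        have hstep : loadMaze1_pushK (rows, cur) c = (rows ++ [cur ++ [c]], []) := by
          simp [loadMaze1_pushK, h9]
        rw [hstep, loadMaze1_fold_inv xs (rows ++ [cur ++ [c]]) [] (by simp)]
        have hx : cur ++ c :: xs = (cur ++ [c]) ++ xs := by simp
        rw [hx]
        simp only [List.nil_append]
        have hne : ¬ ((cur ++ [c]) ++ xs = []) := by simp
        conv_rhs => rw [loadMaze1_chunks]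
        rw [dif_neg hne]
        have hlen : (cur ++ [c]).length = 10 := by simp; omega
        have ht : ((cur ++ [c]) ++ xs).take 10 = cur ++ [c] := by
          rw [← hlen, List.take_left]
        have hd : ((cur ++ [c]) ++ xs).drop 10 = xs := by
          rw [← hlen, List.drop_left]
        rw [ht, hd]
        simp
      · have h9 : ¬ cur.length = 9 := by omega
        have hstep : loadMaze1_pushK (rows, cur) c = (rows, cur ++ [c]) := by
          simp [loadMaze1_pushK, h9]
        rw [hstep, loadMaze1_fold_inv xs rows (cur ++ [c]) (by simp; omega)]
        simp

theorem loadMaze1_spec : Claim_equal_loadMaze1 := by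
  intro input_file _hdom hpre
  unfold Spec_loadMaze1
  obtain ⟨hne, hrows⟩ := hpre
  unfold loadMaze1 loadMaze1_alt
  dsimp only
  rw [loadMaze1_nested_fold input_file
      (fun acc c =>
        if c == "1" then acc ++ [c]
        else if c == "0" then acc ++ [c]
        else if c == "s" then acc ++ [c]
        else if c == "e" then acc ++ [c]
        else acc) [] hrows,
     loadMaze1_nested_fold input_file loadMaze1_push ([], []) hrows]
  set flat := input_file.flatMap (fun row => row.take (input_file.headD []).length) with hflat
  rw [loadMaze1_stepA_eq, PySem.List.foldl_append_if_eq_filter, loadMaze1_push_eq,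
      PySem.List.foldl_if_eq_foldl_filter, List.nil_append]
  rw [loadMaze1_fold_inv (flat.filter loadMaze1_keep) [] [] (by simp)]
  rw [loadMaze1_toMatrix_eq_map,
      ← loadMaze1_chunks_eq_map (flat.filter loadMaze1_keep).length _ le_rfl]
  simp
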